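-- pv_equiv track=rewrite | github.com/JHMeusener/reconstructionCity | pointsRefine_withMockPoints4Convex.py | createVoxelPointsXYDict2
-- ===== SOURCE A (Python) =====
-- def createVoxelPointsXYDict2(voxels):
--     voxelmap = {}
--     for voxel in voxels:
--         key = (voxel[0], voxel[1])
--         if key in voxelmap:
--             voxelmap[key]["min"] = min(voxelmap[key]["min"],voxel[2])
--             voxelmap[key]["max"] = max(voxelmap[key]["max"],voxel[2])
--         else:
--             voxelmap[key] = {"min":voxel[2],"max":voxel[2]}
--     return voxelmap
-- ===== SOURCE B (Python) =====
-- def createVoxelPointsXYDict2(voxels):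
--     # Two-phase: collect all z values per (x, y) column, then reduce each list to its min/max.
--     groups = {}
--     for voxel in voxels:
--         groups.setdefault((voxel[0], voxel[1]), []).append(voxel[2])
--     return {key: {"min": min(zs), "max": max(zs)} for key, zs in groups.items()}
-- ===== Notes on version B (the rewrite author's own statement) =====
-- stated objective: alternative
-- what changed: A keeps running min/max per key inside a single dict-update loop; B is a two-phase collect-then-reduce: first it groups all z values per (x,y) into lists, then a second pass reduces each list with min()/max().
import Mathlib
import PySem

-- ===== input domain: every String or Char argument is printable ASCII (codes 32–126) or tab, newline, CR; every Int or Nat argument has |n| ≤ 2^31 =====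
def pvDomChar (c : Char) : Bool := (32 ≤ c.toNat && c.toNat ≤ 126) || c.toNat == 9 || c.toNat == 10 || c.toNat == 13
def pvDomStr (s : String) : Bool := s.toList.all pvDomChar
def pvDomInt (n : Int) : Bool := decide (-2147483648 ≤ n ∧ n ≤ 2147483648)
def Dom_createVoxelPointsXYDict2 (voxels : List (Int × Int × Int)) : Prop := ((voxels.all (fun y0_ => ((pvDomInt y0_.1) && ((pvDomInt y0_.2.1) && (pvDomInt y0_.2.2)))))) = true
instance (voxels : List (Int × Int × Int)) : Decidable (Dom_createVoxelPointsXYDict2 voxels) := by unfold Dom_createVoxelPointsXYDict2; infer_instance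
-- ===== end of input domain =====

-- B replaces A's running min/max update loop by a two-phase collect-then-reduce (group z-lists, then min/max each); same cost, different decomposition.

-- ===== PORT A =====
-- one loop step of A: running min/max kept in the inner {"min":…, "max":…} dict
def stepA (vm : PySem.Dict (Int × Int) (PySem.Dict String Int)) (v : Int × Int × Int) :
    PySem.Dict (Int × Int) (PySem.Dict String Int) :=
  let key := (v.1, v.2.1)
  if vm.contains key then
    -- voxelmap[key]["min"] = min(...); voxelmap[key]["max"] = max(...): in-place mutation of
    -- the stored inner dict = overwrite-insert back at the same key
    let inner := vm.getD key PySem.Dict.empty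
    let inner := inner.insert "min" (min (inner.getD "min" 0) v.2.2)
    let inner := inner.insert "max" (max (inner.getD "max" 0) v.2.2)
    vm.insert key inner
  else
    vm.insert key (PySem.Dict.ofList [("min", v.2.2), ("max", v.2.2)])

def createVoxelPointsXYDict2 (voxels : List (Int × Int × Int)) : List (Int × Int × List (String × Int)) :=
  ((voxels.foldl stepA PySem.Dict.empty).items).map (fun p => (p.1.1, p.1.2, p.2.items))

-- ===== PORT B =====
-- phase 1 loop step of B: groups.setdefault(key, []).append(z)
def stepB (g : PySem.Dict (Int × Int) (List Int)) (v : Int × Int × Int) :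
    PySem.Dict (Int × Int) (List Int) :=
  g.insert (v.1, v.2.1) (g.getD (v.1, v.2.1) [] ++ [v.2.2])

-- builtin min(zs) / max(zs)
def pyMinList (zs : List Int) : Int := (PySem.List.min? zs (fun y => y)).getD 0
def pyMaxList (zs : List Int) : Int := (PySem.List.max? zs (fun y => y)).getD 0

def createVoxelPointsXYDict2_alt (voxels : List (Int × Int × Int)) : List (Int × Int × List (String × Int)) :=
  ((voxels.foldl stepB PySem.Dict.empty).items).map
    (fun p => (p.1.1, p.1.2, [("min", pyMinList p.2), ("max", pyMaxList p.2)]))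

-- ===== PRECONDITION & SPEC =====
def Spec_createVoxelPointsXYDict2 (voxels : List (Int × Int × Int)) (out : List (Int × Int × List (String × Int))) : Prop := out = createVoxelPointsXYDict2_alt voxels
instance (voxels : List (Int × Int × Int)) (out : List (Int × Int × List (String × Int))) : Decidable (Spec_createVoxelPointsXYDict2 voxels out) := by unfold Spec_createVoxelPointsXYDict2; infer_instance

-- ===== CLAIM (what is proved, stated in full; the proofs are below) =====
def Claim_equal_createVoxelPointsXYDict2 : Prop := ∀ (voxels : List (Int × Int × Int)), Dom_createVoxelPointsXYDict2 voxels → Spec_createVoxelPointsXYDict2 voxels (createVoxelPointsXYDict2 voxels)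

-- ===== LEMMAS AND PROOFS =====

-- A's inner dict for the z-list zs
def innerOf (zs : List Int) : PySem.Dict String Int :=
  PySem.Dict.mk [("min", pyMinList zs), ("max", pyMaxList zs)]

def pairF (p : (Int × Int) × List Int) : (Int × Int) × PySem.Dict String Int :=
  (p.1, innerOf p.2)

theorem pyMinList_append (x : Int) (t : List Int) (z : Int) :
    pyMinList (x :: (t ++ [z])) = min (pyMinList (x :: t)) z := by
  simp [pyMinList, PySem.List.min?_id_cons, List.foldl_append]

theorem pyMaxList_append (x : Int) (t : List Int) (z : Int) :
    pyMaxList (x :: (t ++ [z])) = max (pyMaxList (x :: t)) z := by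
  simp [pyMaxList, PySem.List.max?_id_cons, List.foldl_append]

theorem contains_mk_map (l : List ((Int × Int) × List Int)) (k : Int × Int) :
    (PySem.Dict.mk (l.map pairF)).contains k = (PySem.Dict.mk l).contains k := by
  induction l with
  | nil => rfl
  | cons p t ih =>
      simp only [List.map_cons, PySem.Dict.contains_mk, List.any_cons] at *
      simp [pairF, ih]

theorem get?_mk_map (l : List ((Int × Int) × List Int)) (k : Int × Int) :
    (PySem.Dict.mk (l.map pairF)).get? k = ((PySem.Dict.mk l).get? k).map innerOf := by
  induction l with
  | nil => rfl
  | cons p t ih =>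
      simp only [List.map_cons, pairF]
      rw [PySem.Dict.get?_mk_cons, PySem.Dict.get?_mk_cons]
      by_cases h : p.1 == k
      · simp [h]
      · simp [h, ih]

theorem step_commute (l : List ((Int × Int) × List Int))
    (hne : ∀ p ∈ l, p.2 ≠ []) (v : Int × Int × Int) :
    stepA (PySem.Dict.mk (l.map pairF)) v
      = PySem.Dict.mk ((stepB (PySem.Dict.mk l) v).items.map pairF) := by
  have hc := contains_mk_map l (v.1, v.2.1)
  by_cases h : (PySem.Dict.mk l).contains (v.1, v.2.1)
  · -- key present: A updates running min/max; B appends z to the first matching list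
    obtain ⟨zs, hzs⟩ : ∃ zs, (PySem.Dict.mk l).get? (v.1, v.2.1) = some zs := by
      cases hg : (PySem.Dict.mk l).get? (v.1, v.2.1) with
      | none =>
          rw [PySem.Dict.contains_eq_isSome_get?, hg] at h; simp at h
      | some zs => exact ⟨zs, rfl⟩
    have hmem : ((v.1, v.2.1), zs) ∈ l := PySem.Dict.mem_items_of_get?_eq_some _ hzs
    obtain ⟨x, t, rfl⟩ : ∃ x t, zs = x :: t := by
      cases zs with
      | nil => exact absurd rfl (hne _ hmem)
      | cons x t => exact ⟨x, t, rfl⟩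
    have hA : stepA (PySem.Dict.mk (l.map pairF)) v
        = (PySem.Dict.mk (l.map pairF)).insert (v.1, v.2.1) (innerOf ((x :: t) ++ [v.2.2])) := by
      simp only [stepA, hc, h, if_true]
      rw [PySem.Dict.getD_eq_get?_getD, get?_mk_map, hzs]
      simp [innerOf, PySem.Dict.insert, PySem.Dict.getD_eq_get?_getD, PySem.Dict.get?_mk_cons,
            pyMinList_append, pyMaxList_append]
    have hB : stepB (PySem.Dict.mk l) v
        = (PySem.Dict.mk l).insert (v.1, v.2.1) ((x :: t) ++ [v.2.2]) := by
      simp only [stepB]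
      rw [PySem.Dict.getD_eq_get?_getD, hzs]
      rfl
    rw [hA, hB]
    apply PySem.Dict.ext
    rw [PySem.Dict.items_insert, PySem.Dict.items_insert]
    simp only [hc, h, if_true]
    rw [List.map_map, List.map_map]
    apply List.map_congr_left
    intro p _
    by_cases hp : p.1 = (v.1, v.2.1) <;>
      simp [pairF, hp, innerOf, pyMinList_append, pyMaxList_append]
  · -- fresh key: both append a new entry
    have hA : stepA (PySem.Dict.mk (l.map pairF)) v
        = (PySem.Dict.mk (l.map pairF)).insert (v.1, v.2.1)
            (PySem.Dict.ofList [("min", v.2.2), ("max", v.2.2)]) := by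
      simp only [stepA, hc]
      rw [if_neg h]
    have hB : stepB (PySem.Dict.mk l) v
        = (PySem.Dict.mk l).insert (v.1, v.2.1) ([] ++ [v.2.2]) := by
      simp only [stepB]
      rw [PySem.Dict.getD_eq_get?_getD, (PySem.Dict.get?_eq_none_iff_contains _ _).mpr (by simp only [Bool.not_eq_true] at h; exact h)]
      rfl
    rw [hA, hB]
    apply PySem.Dict.ext
    rw [PySem.Dict.items_insert, PySem.Dict.items_insert]
    simp only [hc, h, Bool.false_eq_true, if_false, List.map_append]
    rfl

theorem stepB_nonempty (l : List ((Int × Int) × List Int))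
    (hne : ∀ p ∈ l, p.2 ≠ []) (v : Int × Int × Int) :
    ∀ p ∈ (stepB (PySem.Dict.mk l) v).items, p.2 ≠ [] := by
  intro p hp
  simp only [stepB] at hp
  rcases (PySem.Dict.mem_items_insert _ _ _ _).mp hp with h | h
  · subst h; simp
  · exact hne _ h.1

theorem fold_commute (voxels : List (Int × Int × Int)) :
    ∀ (l : List ((Int × Int) × List Int)), (∀ p ∈ l, p.2 ≠ []) →
    voxels.foldl stepA (PySem.Dict.mk (l.map pairF))
      = PySem.Dict.mk ((voxels.foldl stepB (PySem.Dict.mk l)).items.map pairF) := by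
  induction voxels with
  | nil => intro l _; rfl
  | cons v vs ih =>
      intro l hne
      simp only [List.foldl_cons]
      rw [step_commute l hne v]
      have hitems : stepB (PySem.Dict.mk l) v
          = PySem.Dict.mk ((stepB (PySem.Dict.mk l) v).items) := rfl
      rw [hitems]
      exact ih _ (by intro p hp; exact stepB_nonempty l hne v p hp)

-- ===== VERDICT (by name: the statement is the Claim_ definition above) =====
theorem createVoxelPointsXYDict2_spec : Claim_equal_createVoxelPointsXYDict2 := by
  intro voxels _
  unfold Spec_createVoxelPointsXYDict2 createVoxelPointsXYDict2 createVoxelPointsXYDict2_alt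
  have h := fold_commute voxels [] (by simp)
  have hempty : PySem.Dict.mk (([] : List ((Int × Int) × List Int)).map pairF)
      = (PySem.Dict.empty : PySem.Dict (Int × Int) (PySem.Dict String Int)) := rfl
  have hempty' : (PySem.Dict.mk ([] : List ((Int × Int) × List Int)))
      = (PySem.Dict.empty : PySem.Dict (Int × Int) (List Int)) := rfl
  rw [hempty, hempty'] at h
  rw [h, PySem.Dict.items, List.map_map]
  apply List.map_congr_left
  intro p _
  simp [pairF, innerOf]
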